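-- pv_equiv track=rewrite | github.com/tompascall/adventofcode2019 | fiddles/_08/fiddle.py | merge_layers
-- ===== SOURCE A (Python) =====
-- WHITE = '1'
--
-- BLACK = '0'
--
-- def merge_layers(layers, height):
--     def get_rows_in_height(row_num):
--         return [layer[row_num] for layer in layers]
--
--     def merge_pixel(zipped_row):
--         def get_pixel_value(pixel_in_layers):
--             white_index = pixel_in_layers.index(WHITE) if WHITE in pixel_in_layers else -1
--             black_index = pixel_in_layers.index(BLACK) if BLACK in pixel_in_layers else -1
--             if white_index != -1 and white_index < black_index or black_index == -1:
--                 return WHITE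
--             return BLACK
--
--         return [get_pixel_value(pixel_in_layers) for pixel_in_layers in zipped_row]
--
--     zipped_rows = [list(zip(*get_rows_in_height(row_num))) for row_num in range(height)]
--     return [merge_pixel(zipped_row) for zipped_row in zipped_rows]
-- ===== SOURCE B (Python) =====
-- WHITE = '1'
--
-- BLACK = '0'
--
-- def merge_layers(layers, height):
--     # Painter's algorithm: start from an all-white canvas and paint the layers
--     # back-to-front; any '1' or '0' pixel of a nearer layer overwrites the canvas,
--     # so after painting the front layer each pixel holds its first opaque value.
--     canvas = [
--         [WHITE] * min((len(layer[row]) for layer in layers), default=0)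
--         for row in range(height)
--     ]
--     for layer in reversed(layers):
--         for row in range(height):
--             source_row = layer[row]
--             canvas_row = canvas[row]
--             for col in range(len(canvas_row)):
--                 p = source_row[col]
--                 if p == WHITE or p == BLACK:
--                     canvas_row[col] = p
--     return canvas
-- ===== Notes on version B (the rewrite author's own statement) =====
-- stated objective: alternative
-- what changed: Replaces A's pixel-major scheme (zip-transpose each row, then for every pixel search the layer stack with .index for WHITE/BLACK) by a layer-major painter's algorithm: build an all-white canvas and fold the layers over it back-to-front, overpainting every '1'/'0' pixel, so the front layer's opaque pixels end up on top.
import Mathlib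
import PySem

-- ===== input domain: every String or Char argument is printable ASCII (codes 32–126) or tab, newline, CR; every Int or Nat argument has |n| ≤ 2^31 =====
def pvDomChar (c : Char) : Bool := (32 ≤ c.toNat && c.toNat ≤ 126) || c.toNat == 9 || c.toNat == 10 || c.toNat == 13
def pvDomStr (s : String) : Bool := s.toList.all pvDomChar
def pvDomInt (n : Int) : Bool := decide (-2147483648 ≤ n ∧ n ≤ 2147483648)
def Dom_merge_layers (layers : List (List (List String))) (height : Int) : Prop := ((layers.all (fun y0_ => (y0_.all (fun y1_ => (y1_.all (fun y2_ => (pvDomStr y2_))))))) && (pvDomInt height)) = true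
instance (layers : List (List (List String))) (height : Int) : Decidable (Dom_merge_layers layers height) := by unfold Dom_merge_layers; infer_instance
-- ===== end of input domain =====

-- ===== PORT A =====
-- B paints the layers back-to-front onto an all-white canvas instead of A's per-pixel
-- index-of-WHITE/BLACK search over the transposed rows (objective: alternative; return value only).
def pvWHITE : String := "1"

def pvBLACK : String := "0"

-- layer[row_num]: raises IndexError out of range (excluded by Pre_); [] is a total stand-in there
def pvGetRowsInHeight (layers : List (List (List String))) (rowNum : Int) : List (List String) :=
  layers.map (fun layer => PySem.List.pyGetD layer rowNum [])

-- port of the builtin zip(*rows): transpose truncated to the shortest row (zip(*[]) = [])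
def pvZipStar (rows : List (List String)) : List (List String) :=
  let m : Int := PySem.List.minD (rows.map (fun r => (r.length : Int))) (fun x => x) 0
  (PySem.List.pyRange 0 m).map (fun i => rows.map (fun r => PySem.List.pyGetD r i ""))

def pvGetPixelValue (pixelInLayers : List String) : String :=
  let whiteIndex : Int :=
    if pvWHITE ∈ pixelInLayers then ((PySem.List.index? pixelInLayers pvWHITE).getD 0 : Nat) else -1
  let blackIndex : Int :=
    if pvBLACK ∈ pixelInLayers then ((PySem.List.index? pixelInLayers pvBLACK).getD 0 : Nat) else -1
  if (whiteIndex ≠ -1 ∧ whiteIndex < blackIndex) ∨ blackIndex = -1 then pvWHITE else pvBLACK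

def pvMergePixel (zippedRow : List (List String)) : List String :=
  zippedRow.map pvGetPixelValue

def merge_layers (layers : List (List (List String))) (height : Int) : List (List String) :=
  let zippedRows := (PySem.List.pyRange 0 height).map (fun rowNum => pvZipStar (pvGetRowsInHeight layers rowNum))
  zippedRows.map pvMergePixel

-- ===== PORT B =====
-- initial canvas row: [WHITE] * min((len(layer[row]) for layer in layers), default=0)
def pvCanvasRow (layers : List (List (List String))) (row : Int) : List String :=
  let w : Int := PySem.List.minD (layers.map (fun layer => ((PySem.List.pyGetD layer row []).length : Int))) (fun x => x) 0
  List.replicate w.toNat pvWHITE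

-- inner col loop: paint every '1'/'0' pixel of source_row onto canvas_row (in-place writes → List.set)
def pvPaintRow (sourceRow canvasRow : List String) : List String :=
  (PySem.List.pyRange 0 (canvasRow.length : Int)).foldl
    (fun acc col =>
      let p := PySem.List.pyGetD sourceRow col ""
      if p = pvWHITE ∨ p = pvBLACK then PySem.List.pySetD acc col p else acc)
    canvasRow

-- body of 'for layer in reversed(layers)': paint the layer onto every canvas row
def pvPaintLayer (canvas : List (List String)) (layer : List (List String)) : List (List String) :=
  canvas.mapIdx (fun row canvasRow => pvPaintRow (PySem.List.pyGetD layer (row : Int) []) canvasRow)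

def merge_layers_alt (layers : List (List (List String))) (height : Int) : List (List String) :=
  let canvas := (PySem.List.pyRange 0 height).map (fun row => pvCanvasRow layers row)
  layers.reverse.foldl pvPaintLayer canvas

-- ===== PRECONDITION & SPEC =====
-- Pre_ excludes exactly the inputs where Python A raises IndexError: some layer has fewer than height rows.
def Pre_merge_layers (layers : List (List (List String))) (height : Int) : Prop :=
  ∀ l ∈ layers, height ≤ (l.length : Int)
instance (layers : List (List (List String))) (height : Int) : Decidable (Pre_merge_layers layers height) := by unfold Pre_merge_layers; infer_instance

def pvWitness_merge_layers : List (List (List String)) × Int :=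
  ([[["1", "2"], ["2", "0"]], [["0", "0"], ["1", "1"]]], 2)

def Spec_merge_layers (layers : List (List (List String))) (height : Int) (out : List (List String)) : Prop := out = merge_layers_alt layers height
instance (layers : List (List (List String))) (height : Int) (out : List (List String)) : Decidable (Spec_merge_layers layers height out) := by unfold Spec_merge_layers; infer_instance

-- ===== CLAIM (what is proved, stated in full; the proofs are below) =====
def Claim_equal_merge_layers : Prop := ∀ (layers : List (List (List String))) (height : Int), Dom_merge_layers layers height → Pre_merge_layers layers height → Spec_merge_layers layers height (merge_layers layers height)

-- ===== LEMMAS AND PROOFS =====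

-- overwrite step of the painter: keep p if it is opaque, else the pixel painted so far
def pvOw (acc p : String) : String := if p = "1" ∨ p = "0" then p else acc

-- proof-side spine: the first "1"/"0" element of the pixel column, defaulting to "1"
def pvFirstGood : List String → String
  | [] => "1"
  | p :: rest => if p = "1" ∨ p = "0" then p else pvFirstGood rest

-- first "1"/"0" with an arbitrary fallback
def pvFirstGoodD : List String → String → String
  | [], d => d
  | p :: rest, d => if p = "1" ∨ p = "0" then p else pvFirstGoodD rest d

lemma firstGoodD_white (ls : List String) : pvFirstGoodD ls "1" = pvFirstGood ls := by
  induction ls with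
  | nil => rfl
  | cons p rest ih => simp [pvFirstGood, pvFirstGoodD, ih]

-- last-write-wins over the reversed list = first match in order
lemma overwrite_reverse (ls : List String) (d : String) :
    ls.reverse.foldl pvOw d = pvFirstGoodD ls d := by
  induction ls generalizing d with
  | nil => rfl
  | cons p rest ih =>
    simp only [List.reverse_cons, List.foldl_append, List.foldl_cons, List.foldl_nil, ih,
      pvFirstGoodD, pvOw]

-- mapIdx toolbox
lemma pvMapIdx_comp {α β γ : Type} (l : List α) (f : Nat → α → β) (h : Nat → β → γ) :
    (l.mapIdx f).mapIdx h = l.mapIdx (fun i x => h i (f i x)) := by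
  induction l generalizing f h with
  | nil => rfl
  | cons a t ih => simp only [List.mapIdx_cons, ih]

lemma pvMapIdx_id {α : Type} (l : List α) : l.mapIdx (fun _ x => x) = l := by
  induction l with
  | nil => rfl
  | cons a t ih => simp only [List.mapIdx_cons, ih]

lemma pvMapIdx_map {α β γ : Type} (l : List α) (f : α → β) (h : Nat → β → γ) :
    (l.map f).mapIdx h = l.mapIdx (fun i x => h i (f x)) := by
  induction l generalizing h with
  | nil => rfl
  | cons a t ih => simp only [List.map_cons, List.mapIdx_cons, ih]

lemma pvMapIdx_range {α : Type} (n : Nat) (h : Nat → Nat → α) :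
    (List.range n).mapIdx h = (List.range n).map (fun k => h k k) := by
  induction n generalizing h with
  | zero => rfl
  | succ m ih =>
    simp only [List.range_succ, List.mapIdx_append, List.map_append, ih, List.length_range]
    simp [List.mapIdx_cons]

lemma pvMapIdx_replicate {α : Type} (n : Nat) (a : α) (h : Nat → α → α) :
    (List.replicate n a).mapIdx h = (List.range n).map (fun k => h k a) := by
  induction n generalizing h with
  | zero => rfl
  | succ m ih =>
    rw [List.replicate_succ, List.range_succ_eq_map]
    simp only [List.mapIdx_cons, ih, List.map_cons, List.map_map]
    rfl

-- the inner col loop is a per-index overwrite of the canvas row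
lemma paint_prefix (r : List String) (n : Nat) (acc : List String) (h : n ≤ acc.length) :
    (PySem.List.pyRange 0 (n : Int)).foldl
      (fun acc col =>
        let p := PySem.List.pyGetD r col ""
        if p = pvWHITE ∨ p = pvBLACK then PySem.List.pySetD acc col p else acc) acc
    = (acc.take n).mapIdx (fun j x => pvOw x (PySem.List.pyGetD r (j : Int) "")) ++ acc.drop n := by
  induction n with
  | zero => simp [PySem.List.pyRange_one 0 0]
  | succ m ih =>
    have hm : m ≤ acc.length := Nat.le_of_succ_le h
    have hmlt : m < acc.length := h
    have hcast : ((m + 1 : Nat) : Int) = (m : Int) + 1 := by push_cast; ring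
    rw [hcast, PySem.List.pyRange_one_succ_right (by exact_mod_cast Nat.zero_le m),
      List.foldl_append, List.foldl_cons, List.foldl_nil, ih hm]
    have hTlen : ((acc.take m).mapIdx
        (fun j x => pvOw x (PySem.List.pyGetD r (j : Int) ""))).length = m := by
      simp [List.length_mapIdx, List.length_take, Nat.min_eq_left hm]
    have hdrop : acc.drop m = acc[m] :: acc.drop (m + 1) := List.drop_eq_getElem_cons hmlt
    have htake : acc.take (m + 1) = acc.take m ++ [acc[m]] := by
      rw [List.take_add_one, List.getElem?_eq_getElem hmlt]; rfl
    rw [htake, List.mapIdx_append, hdrop]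
    simp only [List.length_take, Nat.min_eq_left hm, List.mapIdx_cons, List.mapIdx_nil]
    by_cases hp : PySem.List.pyGetD r (m : Int) "" = pvWHITE ∨ PySem.List.pyGetD r (m : Int) "" = pvBLACK
    · rw [if_pos hp, PySem.List.pySetD_of_nonneg _ _ (by positivity), Int.toNat_natCast,
        List.set_append]
      rw [if_neg (by rw [hTlen]; omega)]
      rw [hTlen, Nat.sub_self, List.set_cons_zero]
      have : pvOw acc[m] (PySem.List.pyGetD r ((0 + m : Nat) : Int) "") =
          PySem.List.pyGetD r (m : Int) "" := by
        simp only [Nat.zero_add, pvOw]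
        rcases hp with hp | hp <;> simp [hp, pvWHITE, pvBLACK]
      rw [this]
      simp
    · rw [if_neg hp]
      have : pvOw acc[m] (PySem.List.pyGetD r ((0 + m : Nat) : Int) "") = acc[m] := by
        simp only [Nat.zero_add, pvOw]
        simp only [pvWHITE, pvBLACK] at hp
        rw [if_neg hp]
      rw [this]
      simp

lemma paintRow_eq (r c : List String) :
    pvPaintRow r c = c.mapIdx (fun j x => pvOw x (PySem.List.pyGetD r (j : Int) "")) := by
  unfold pvPaintRow
  have := paint_prefix r c.length c le_rfl
  simpa using this

lemma paintLayer_eq (canvas layer : List (List String)) :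
    pvPaintLayer canvas layer = canvas.mapIdx (fun row crow =>
      crow.mapIdx (fun col x =>
        pvOw x (PySem.List.pyGetD (PySem.List.pyGetD layer (row : Int) []) (col : Int) ""))) := by
  simp only [pvPaintLayer, paintRow_eq]

-- folding the painter over the layers = per-pixel overwrite fold
lemma fold_eq (ls : List (List (List String))) (canvas : List (List String)) :
    ls.foldl pvPaintLayer canvas = canvas.mapIdx (fun row crow =>
      crow.mapIdx (fun col x =>
        (ls.map (fun layer =>
          PySem.List.pyGetD (PySem.List.pyGetD layer (row : Int) []) (col : Int) "")).foldl pvOw x)) := by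
  induction ls generalizing canvas with
  | nil => simp only [List.foldl_nil, List.map_nil, pvMapIdx_id]
  | cons l rest ih =>
    rw [List.foldl_cons, ih, paintLayer_eq, pvMapIdx_comp]
    simp only [pvMapIdx_comp, List.map_cons, List.foldl_cons]

-- A's per-pixel value is the first "1"/"0" in the column (unfolding the index arithmetic)
lemma index?_cons_eq (p v : String) (rest : List String) :
    PySem.List.index? (p :: rest) v = if p = v then some 0 else (PySem.List.index? rest v).map (· + 1) := by
  simp [PySem.List.index?_eq_idxOf?, List.idxOf?_cons]

lemma index?_exists_of_mem (v : String) (rest : List String) (h : v ∈ rest) :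
    ∃ k, PySem.List.index? rest v = some k :=
  Option.isSome_iff_exists.mp ((PySem.List.index?_isSome_iff rest v).mpr h)

lemma index?_eq_none_of_not_mem (v : String) (rest : List String) (h : v ∉ rest) :
    PySem.List.index? rest v = none := by
  rw [PySem.List.index?_eq_none_iff]; exact h

lemma pvGetPixelValue_eq_firstGood (pil : List String) :
    pvGetPixelValue pil = pvFirstGood pil := by
  induction pil with
  | nil => decide
  | cons p rest ih =>
    rw [pvFirstGood]
    by_cases h1 : p = "1"
    · subst h1
      rw [if_pos (Or.inl rfl)]
      by_cases hb : "0" ∈ rest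
      · obtain ⟨m, hm⟩ := index?_exists_of_mem "0" rest hb
        simp only [pvGetPixelValue, pvWHITE, pvBLACK, index?_cons_eq, List.mem_cons, hm]
        simp [hb]
      · have hm := index?_eq_none_of_not_mem "0" rest hb
        simp only [pvGetPixelValue, pvWHITE, pvBLACK, index?_cons_eq, List.mem_cons, hm]
        simp [hb]
    · by_cases h0 : p = "0"
      · subst h0
        rw [if_pos (Or.inr rfl)]
        have hne1 : ¬ (("0":String) = "1") := by decide
        by_cases hw : "1" ∈ rest
        · obtain ⟨k, hk⟩ := index?_exists_of_mem "1" rest hw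
          simp only [pvGetPixelValue, pvWHITE, pvBLACK, index?_cons_eq, List.mem_cons, hk]
          simp [hw]
          omega
        · have hk := index?_eq_none_of_not_mem "1" rest hw
          simp only [pvGetPixelValue, pvWHITE, pvBLACK, index?_cons_eq, List.mem_cons, hk]
          simp [hw]
      · rw [if_neg (by simp [h1, h0]), ← ih]
        have hne1 : ¬ (("1":String) = p) := fun h => h1 h.symm
        have hne0 : ¬ (("0":String) = p) := fun h => h0 h.symm
        by_cases hw : "1" ∈ rest <;> by_cases hb : "0" ∈ rest
        · obtain ⟨k, hk⟩ := index?_exists_of_mem "1" rest hw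
          obtain ⟨m, hm⟩ := index?_exists_of_mem "0" rest hb
          simp only [pvGetPixelValue, pvWHITE, pvBLACK, index?_cons_eq, List.mem_cons, hk, hm]
          simp [hne1, hne0, hw, hb]
          split_ifs with hA hB hB <;> first | rfl | (exfalso; simp only [Option.getD_some] at hA hB; omega)
        · have hm := index?_eq_none_of_not_mem "0" rest hb
          obtain ⟨k, hk⟩ := index?_exists_of_mem "1" rest hw
          simp only [pvGetPixelValue, pvWHITE, pvBLACK, index?_cons_eq, List.mem_cons, hk, hm]
          simp [hne1, hne0, hw, hb]
        · have hk := index?_eq_none_of_not_mem "1" rest hw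
          obtain ⟨m, hm⟩ := index?_exists_of_mem "0" rest hb
          simp only [pvGetPixelValue, pvWHITE, pvBLACK, index?_cons_eq, List.mem_cons, hk, hm]
          simp [hne1, hne0, hw, hb]
        · have hk := index?_eq_none_of_not_mem "1" rest hw
          have hm := index?_eq_none_of_not_mem "0" rest hb
          simp only [pvGetPixelValue, pvWHITE, pvBLACK, index?_cons_eq, List.mem_cons, hk, hm]
          simp [hne1, hne0, hw, hb]

-- ===== VERDICT =====
theorem merge_layers_spec : Claim_equal_merge_layers := by
  intro layers height _hdom _hpre
  unfold Spec_merge_layers merge_layers merge_layers_alt pvMergePixel pvGetRowsInHeight pvZipStar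
  rw [fold_eq]
  rw [PySem.List.pyRange_one 0 height]
  simp only [Int.sub_zero, List.map_map, Function.comp_def, pvMapIdx_map, pvMapIdx_range]
  refine List.map_congr_left (fun k _hk => ?_)
  simp only [zero_add]
  unfold pvCanvasRow
  simp only [pvMapIdx_replicate]
  rw [PySem.List.pyRange_one 0 _]
  simp only [Int.sub_zero, List.map_map, Function.comp_def]
  refine List.map_congr_left (fun c _hc => ?_)
  simp only [zero_add]
  rw [pvGetPixelValue_eq_firstGood]
  rw [List.map_reverse, overwrite_reverse]
  simp only [pvWHITE, firstGoodD_white]
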